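-- pv_equiv track=rewrite | github.com/m1nnh/Problem-Solving | Programmers/최솟값 만들기.py | solution
-- ===== SOURCE A (Python) =====
-- import heapq
--
-- def solution(A, B):
--     answer = 0
--     queueA = []
--     queueB = []
--
--     for i in range(len(A)):
--         heapq.heappush(queueA, A[i])
--         heapq.heappush(queueB, -B[i])
--
--     while queueA:
--         a, b = heapq.heappop(queueA), -heapq.heappop(queueB)
--         answer += a * b
--
--     return answer
-- ===== SOURCE B (Python) =====
-- def solution(A, B):
--     rest_a = list(A)
--     rest_b = B[:len(A)]
--     answer = 0
--     while rest_a: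
--         a = min(rest_a)
--         b = max(rest_b)
--         rest_a.remove(a)
--         rest_b.remove(b)
--         answer += a * b
--     return answer
-- ===== Notes on version B (the rewrite author's own statement) =====
-- stated objective: alternative
-- what changed: Replaced the two heaps with a selection loop: no heap or sort at all, each iteration scans the remaining elements for min(rest_a) and max(rest_b), removes them, and accumulates their product.
import Mathlib
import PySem

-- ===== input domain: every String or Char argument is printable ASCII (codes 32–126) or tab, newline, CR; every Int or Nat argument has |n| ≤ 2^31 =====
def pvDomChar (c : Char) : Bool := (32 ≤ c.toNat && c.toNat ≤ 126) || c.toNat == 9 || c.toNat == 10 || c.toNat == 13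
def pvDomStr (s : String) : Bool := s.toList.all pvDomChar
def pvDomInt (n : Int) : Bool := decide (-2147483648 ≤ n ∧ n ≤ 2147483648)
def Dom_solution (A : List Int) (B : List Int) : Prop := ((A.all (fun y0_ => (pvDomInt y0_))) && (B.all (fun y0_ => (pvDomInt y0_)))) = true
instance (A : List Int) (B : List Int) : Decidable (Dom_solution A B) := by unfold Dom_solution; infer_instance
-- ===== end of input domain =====

-- B replaces A's two heaps with a selection loop: no heap (or sort) at all, each
-- iteration scans the remaining elements for min(rest_a)/max(rest_b), removes them
-- and accumulates their product (alternative algorithm, O(n^2) vs A's O(n log n)).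

-- ===== PORT A =====
-- heapq.heappush / heapq.heappop are modelled by a sorted-list min-priority-queue:
-- for Int elements this has exactly heapq's observable behaviour (pop returns the minimum).
def hpPush (h : List Int) (x : Int) : List Int := List.orderedInsert (· ≤ ·) x h

def hpPop : List Int → Int × List Int
  | [] => (0, [])
  | x :: t => (x, t)

-- for i in range(len(A)): heappush(queueA, A[i]); heappush(queueB, -B[i])
-- A[i]/B[i] via pyGetD: exact under Pre_solution (B[i] raises IndexError when len(B) < len(A)).
def pushLoop (A B : List Int) : List Int × List Int :=
  (PySem.List.pyRange 0 (A.length : Int)).foldl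
    (fun st i => (hpPush st.1 (PySem.List.pyGetD A i 0), hpPush st.2 (-(PySem.List.pyGetD B i 0))))
    ([], [])

-- while queueA: a, b = heappop(queueA), -heappop(queueB); answer += a * b
def popLoop : List Int → List Int → Int → Int
  | [], _, answer => answer
  | x :: t, qb, answer => popLoop t (hpPop qb).2 (answer + x * (-(hpPop qb).1))

def solution (A : List Int) (B : List Int) : Int :=
  let st := pushLoop A B
  popLoop st.1 st.2 0

-- ===== PORT B =====
-- while rest_a: a = min(rest_a); b = max(rest_b); rest_a.remove(a); rest_b.remove(b); answer += a*b
-- Fuel is the initial length of rest_a: each iteration removes exactly one element, so the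
-- Python while-loop makes exactly that many iterations. list.remove(v) drops the first
-- occurrence of v, which for Int values is List.erase (matching PySem.List.remove?_eq_some_erase).
def selLoop : Nat → List Int → List Int → Int → Int
  | 0, _, _, answer => answer
  | fuel + 1, la, lb, answer =>
    match PySem.List.min? la (fun x => x) with
    | none => answer           -- rest_a is empty: the while loop exits
    | some a =>
      match PySem.List.max? lb (fun x => x) with
      | none => answer         -- max([]) raises ValueError in Python; outside Pre_solution
      | some b => selLoop fuel (la.erase a) (lb.erase b) (answer + a * b)

-- rest_b = B[:len(A)]
def solution_alt (A : List Int) (B : List Int) : Int :=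
  selLoop A.length A (B.take A.length) 0

-- ===== PRECONDITION & SPEC =====
-- A raises IndexError at B[i] when len(B) < len(A) (and B raises ValueError there too); excluded.
def Pre_solution (A : List Int) (B : List Int) : Prop := A.length ≤ B.length
instance (A : List Int) (B : List Int) : Decidable (Pre_solution A B) := by unfold Pre_solution; infer_instance
def pvWitness_solution : List Int × List Int := ([3, 1, 2], [4, 0, 5])

def Spec_solution (A : List Int) (B : List Int) (out : Int) : Prop := out = solution_alt A B
instance (A : List Int) (B : List Int) (out : Int) : Decidable (Spec_solution A B out) := by unfold Spec_solution; infer_instance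

-- ===== CLAIM (what is proved, stated in full; the proofs are below) =====
def Claim_equal_solution : Prop := ∀ (A : List Int) (B : List Int), Dom_solution A B → Pre_solution A B → Spec_solution A B (solution A B)

-- ===== LEMMAS AND PROOFS =====

-- insertion-sort fold: what the push loop builds on each heap
def insFold (l : List Int) : List Int := l.foldl hpPush []

theorem insFold_append_singleton (l : List Int) (x : Int) :
    insFold (l ++ [x]) = hpPush (insFold l) x := by
  simp [insFold]

theorem insFold_perm_aux (l acc : List Int) : (l.foldl hpPush acc).Perm (acc ++ l) := by
  induction l generalizing acc with
  | nil => simp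
  | cons x t ih =>
      simp only [List.foldl_cons]
      refine (ih (hpPush acc x)).trans ?_
      have h1 : (hpPush acc x).Perm (x :: acc) := List.perm_orderedInsert _ x acc
      exact (h1.append_right t).trans
        (by simpa using (List.perm_middle (a := x) (l₁ := acc) (l₂ := t)).symm)

theorem insFold_perm (l : List Int) : (insFold l).Perm l := by
  simpa using insFold_perm_aux l []

theorem insFold_pairwise_aux (l acc : List Int) (h : acc.Pairwise (· ≤ ·)) :
    (l.foldl hpPush acc).Pairwise (· ≤ ·) := by
  induction l generalizing acc with
  | nil => simpa
  | cons x t ih =>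
      simp only [List.foldl_cons]
      exact ih _ (List.Pairwise.orderedInsert x acc h)

theorem insFold_pairwise (l : List Int) : (insFold l).Pairwise (· ≤ ·) :=
  insFold_pairwise_aux l [] (by simp)

-- the A-heap pops in ascending sorted order
theorem sorted_eq_insFold (l : List Int) :
    PySem.List.sorted l (fun x => x) = insFold l :=
  PySem.List.sorted_id_eq_of_perm_of_pairwise l (insFold l) (insFold_perm l) (insFold_pairwise l)

-- the negated B-heap is the descending sort, negated
theorem insFold_map_neg (l : List Int) :
    insFold (l.map Neg.neg) = (PySem.List.sorted l (fun x => x) true).map Neg.neg := by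
  refine List.Perm.eq_of_pairwise (le := (· ≤ ·)) ?_ (insFold_pairwise _) ?_ ?_
  · intro a b _ _ h1 h2; omega
  · have h := PySem.List.sorted_pairwise_rev l (fun x => x)
    exact (List.pairwise_map.mpr (by simpa using h.imp (fun {a b} hba => by omega)))
  · exact (insFold_perm _).trans ((PySem.List.sorted_perm l (fun x => x) true).map Neg.neg).symm

-- the push loop builds (insertion sort of A's first n, insertion sort of the negated first n of B)
theorem pushFold_take (A B : List Int) (n : Nat) (hA : n ≤ A.length) (hB : n ≤ B.length) :
    (PySem.List.pyRange 0 (n : Int)).foldl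
      (fun st i => (hpPush st.1 (PySem.List.pyGetD A i 0), hpPush st.2 (-(PySem.List.pyGetD B i 0))))
      ([], []) = (insFold (A.take n), insFold ((B.take n).map Neg.neg)) := by
  induction n with
  | zero => simp [PySem.List.pyRange, insFold]
  | succ k ih =>
      have hk : (0 : Int) ≤ (k : Int) := by positivity
      have hA' : k < A.length := by omega
      have hB' : k < B.length := by omega
      have hcast : ((k + 1 : Nat) : Int) = (k : Int) + 1 := by push_cast; ring
      rw [hcast, PySem.List.pyRange_one_succ_right hk, List.foldl_append,
        ih (by omega) (by omega)]
      simp only [List.foldl_cons, List.foldl_nil,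
        PySem.List.pyGetD_ofNat A k 0 hA', PySem.List.pyGetD_ofNat B k 0 hB']
      have htA : A.take (k + 1) = A.take k ++ [A[k]] := by
        rw [List.take_add_one]; simp [List.getElem?_eq_getElem hA']
      have htB : (B.take (k + 1)).map Neg.neg = (B.take k).map Neg.neg ++ [-B[k]] := by
        rw [List.take_add_one, List.getElem?_eq_getElem hB', List.map_append]; rfl
      rw [htA, htB, insFold_append_singleton, insFold_append_singleton]

theorem pushLoop_eq (A B : List Int) (h : A.length ≤ B.length) :
    pushLoop A B = (insFold A, insFold ((B.take A.length).map Neg.neg)) := by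
  have := pushFold_take A B A.length le_rfl h
  simpa [pushLoop] using this

-- the pop loop over (qa, map neg sb) is a zipped multiply-accumulate of qa and sb
theorem popLoop_eq (qa : List Int) : ∀ (sb : List Int) (ans : Int), qa.length = sb.length →
    popLoop qa (sb.map Neg.neg) ans = (qa.zip sb).foldl (fun s ab => s + ab.1 * ab.2) ans := by
  induction qa with
  | nil => intro sb ans _; simp [popLoop]
  | cons x t ih =>
      intro sb ans hlen
      cases sb with
      | nil => simp at hlen
      | cons y u =>
          simp only [List.map_cons, popLoop, hpPop, List.zip_cons_cons, List.foldl_cons]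
          rw [ih u _ (by simpa using hlen)]
          norm_num

-- removing the first minimum is removing the head of the ascending sort
theorem sorted_cons_min (la : List Int) (a : Int)
    (hmin : PySem.List.min? la (fun x => x) = some a) :
    PySem.List.sorted la (fun x => x) = a :: PySem.List.sorted (la.erase a) (fun x => x) := by
  have hmem : a ∈ la := PySem.List.min?_mem hmin
  have hperm : (a :: PySem.List.sorted (la.erase a) (fun x => x)).Perm la :=
    ((PySem.List.sorted_perm (la.erase a) (fun x => x) false).cons a).trans
      (List.perm_cons_erase hmem).symm
  refine (PySem.List.sorted_id_eq_of_perm_of_pairwise la _ hperm ?_)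
  refine List.pairwise_cons.mpr ⟨?_, PySem.List.sorted_pairwise (la.erase a) (fun x => x)⟩
  intro y hy
  exact PySem.List.min?_isMin hmin y (List.mem_of_mem_erase
    ((PySem.List.mem_sorted (la.erase a) (fun x => x) false y).mp hy))

-- removing the first maximum is removing the head of the descending sort
theorem sorted_rev_cons_max (lb : List Int) (b : Int)
    (hmax : PySem.List.max? lb (fun x => x) = some b) :
    PySem.List.sorted lb (fun x => x) true = b :: PySem.List.sorted (lb.erase b) (fun x => x) true := by
  have hmem : b ∈ lb := PySem.List.max?_mem hmax
  have hperm : (PySem.List.sorted lb (fun x => x) true).Perm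
      (b :: PySem.List.sorted (lb.erase b) (fun x => x) true) :=
    (PySem.List.sorted_perm lb (fun x => x) true).trans
      ((List.perm_cons_erase hmem).trans
        ((PySem.List.sorted_perm (lb.erase b) (fun x => x) true).cons b).symm)
  refine List.Perm.eq_of_pairwise (le := fun x y => y ≤ x)
    (fun a b _ _ h1 h2 => le_antisymm h2 h1)
    (PySem.List.sorted_pairwise_rev lb (fun x => x)) ?_ hperm
  refine List.pairwise_cons.mpr ⟨?_, PySem.List.sorted_pairwise_rev (lb.erase b) (fun x => x)⟩
  intro y hy
  exact PySem.List.max?_isMax hmax y (List.mem_of_mem_erase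
    ((PySem.List.mem_sorted (lb.erase b) (fun x => x) true y).mp hy))

-- the selection loop computes the zipped multiply-accumulate of the two sorts
theorem selLoop_eq (n : Nat) : ∀ (la lb : List Int) (ans : Int),
    la.length = n → lb.length = n →
    selLoop n la lb ans =
      ((PySem.List.sorted la (fun x => x)).zip (PySem.List.sorted lb (fun x => x) true)).foldl
        (fun s ab => s + ab.1 * ab.2) ans := by
  induction n with
  | zero =>
      intro la lb ans ha hb
      rw [List.length_eq_zero_iff] at ha hb
      subst ha; subst hb
      simp [selLoop, PySem.List.sorted]
  | succ k ih =>
      intro la lb ans ha hb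
      have hla : la ≠ [] := by intro h; subst h; simp at ha
      have hlb : lb ≠ [] := by intro h; subst h; simp at hb
      obtain ⟨a, hmin⟩ := Option.ne_none_iff_exists'.mp
        (fun h => hla ((PySem.List.min?_eq_none_iff la (fun x : Int => x)).mp h))
      obtain ⟨b, hmax⟩ := Option.ne_none_iff_exists'.mp
        (fun h => hlb ((PySem.List.max?_eq_none_iff lb (fun x : Int => x)).mp h))
      have hamem := PySem.List.min?_mem hmin
      have hbmem := PySem.List.max?_mem hmax
      rw [selLoop, hmin, hmax]
      simp only []
      rw [ih (la.erase a) (lb.erase b) (ans + a * b)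
          (by simp [List.length_erase_of_mem hamem, ha])
          (by simp [List.length_erase_of_mem hbmem, hb]),
        sorted_cons_min la a hmin, sorted_rev_cons_max lb b hmax]
      simp

-- ===== VERDICT (by name: the statement is the Claim_ definition above) =====
theorem solution_spec : Claim_equal_solution := by
  intro A B _ hPre
  have hAB : A.length ≤ B.length := hPre
  unfold Spec_solution solution solution_alt
  rw [pushLoop_eq A B hPre]
  have hlen : (insFold A).length = (PySem.List.sorted (B.take A.length) (fun x => x) true).length := by
    rw [(insFold_perm A).length_eq,
      (PySem.List.sorted_perm (B.take A.length) (fun x => x) true).length_eq,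
      List.length_take]
    omega
  simp only [insFold_map_neg]
  rw [popLoop_eq _ _ 0 hlen,
    selLoop_eq A.length A (B.take A.length) 0 rfl (by simp; omega), sorted_eq_insFold]
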